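-- pv_equiv track=rewrite | github.com/kimtks456/algorithm | 프로그래머스/3/150367. 표현 가능한 이진트리/표현 가능한 이진트리.py | paddedBinStr
-- ===== SOURCE A (Python) =====
-- def paddedBinStr(target):
--     level = 1
--     while True:
--         if 2 ** level - 1 < len(target):
--             level += 1
--         else:
--             break
--     return '0' * (2 ** level - 1 - len(target)) + target
-- ===== SOURCE B (Python) =====
-- def paddedBinStr(target):
--     n = len(target)
--     level = max(1, n.bit_length())
--     return '0' * (2 ** level - 1 - n) + target
-- ===== Notes on version B (the rewrite author's own statement) =====
-- stated objective: simpler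
-- what changed: Replaces the incrementing while-loop search for the tree level with a closed-form bit_length computation (level = max(1, len(target).bit_length())).
import Mathlib
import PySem

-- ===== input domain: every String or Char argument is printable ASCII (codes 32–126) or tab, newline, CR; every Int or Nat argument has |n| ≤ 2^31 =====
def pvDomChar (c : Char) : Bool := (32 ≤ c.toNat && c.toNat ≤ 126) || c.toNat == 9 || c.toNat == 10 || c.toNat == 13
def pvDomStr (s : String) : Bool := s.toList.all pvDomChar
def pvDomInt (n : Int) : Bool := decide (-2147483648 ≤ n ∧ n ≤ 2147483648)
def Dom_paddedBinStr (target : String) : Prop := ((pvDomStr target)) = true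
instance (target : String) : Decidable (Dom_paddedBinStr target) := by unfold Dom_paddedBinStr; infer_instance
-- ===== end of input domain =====

-- B replaces A's incrementing while-loop search for the tree level with a closed-form
-- bit_length computation (simpler, no loop); return value is identical on all inputs.


-- ===== PORT A =====
-- A's while-loop: increment level while 2^level - 1 < n
def pvFindLevel (n : Nat) (level : Nat) : Nat :=
  if 2 ^ level - 1 < n then pvFindLevel n (level + 1) else level
termination_by n - level
decreasing_by
  have h1 : level < 2 ^ level := Nat.lt_two_pow_self
  omega

def paddedBinStr (target : String) : String :=
  let n := target.toList.length
  let level := pvFindLevel n 1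
  String.ofList (List.replicate (2 ^ level - 1 - n) '0' ++ target.toList)

-- ===== PORT B =====
-- Nat.size is Python's int.bit_length
def paddedBinStr_alt (target : String) : String :=
  let n := target.toList.length
  let level := max 1 (Nat.size n)
  String.ofList (List.replicate (2 ^ level - 1 - n) '0' ++ target.toList)

-- ===== PRECONDITION & SPEC =====
def Spec_paddedBinStr (target : String) (out : String) : Prop := out = paddedBinStr_alt target
instance (target : String) (out : String) : Decidable (Spec_paddedBinStr target out) := by unfold Spec_paddedBinStr; infer_instance

-- ===== CLAIM (what is proved, stated in full; the proofs are below) =====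
def Claim_equal_paddedBinStr : Prop := ∀ (target : String), Dom_paddedBinStr target → Spec_paddedBinStr target (paddedBinStr target)

-- ===== LEMMAS AND PROOFS =====
theorem pvFindLevel_eq (n L : Nat) (hL : ¬ 2 ^ L - 1 < n) :
    ∀ k level, L - level ≤ k → level ≤ L →
      (∀ l, level ≤ l → l < L → 2 ^ l - 1 < n) → pvFindLevel n level = L := by
  intro k
  induction k with
  | zero =>
    intro level hk hle _
    have hEq : level = L := by omega
    subst hEq
    unfold pvFindLevel
    simp [hL]
  | succ k ih =>
    intro level hk hle hlo
    unfold pvFindLevel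
    by_cases hc : 2 ^ level - 1 < n
    · have hlt : level < L := by
        rcases Nat.lt_or_ge level L with h | h
        · exact h
        · have : level = L := by omega
          subst this; exact absurd hc hL
      simp only [hc, if_true]
      exact ih (level + 1) (by omega) (by omega) (fun l h1 h2 => hlo l (by omega) h2)
    · have hge : L ≤ level := by
        by_contra h
        exact hc (hlo level (Nat.le_refl _) (by omega))
      have : level = L := by omega
      subst this
      unfold pvFindLevel
      simp [hL]

theorem pvFindLevel_closed (n : Nat) : pvFindLevel n 1 = max 1 (Nat.size n) := by
  set L := max 1 (Nat.size n) with hLdef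
  have hsize : n < 2 ^ Nat.size n := Nat.lt_size_self n
  have hmono : 2 ^ Nat.size n ≤ 2 ^ L := Nat.pow_le_pow_right (by norm_num) (by omega)
  have hL : ¬ 2 ^ L - 1 < n := by omega
  refine pvFindLevel_eq n L hL (L - 1) 1 (by omega) (by omega) ?_
  intro l h1 h2
  have hls : l < Nat.size n := by omega
  have : 2 ^ l ≤ n := Nat.lt_size.mp hls
  have hpos : 0 < 2 ^ l := Nat.two_pow_pos l
  omega

-- ===== VERDICT (by name: the statement is the Claim_ definition above) =====
theorem paddedBinStr_spec : Claim_equal_paddedBinStr := by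
  intro target _
  unfold Spec_paddedBinStr paddedBinStr paddedBinStr_alt
  simp [pvFindLevel_closed]
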